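-- pv_equiv track=rewrite | github.com/yulan307/Auto_Trading_System | app/trend/features.py | _find_missing_segments
-- ===== SOURCE A (Python) =====
-- from typing import Any, Sequence
--
-- def _find_missing_segments(target_dates: Sequence[str], existing_dates: set[str]) -> list[tuple[int, int]]:
--     segments: list[tuple[int, int]] = []
--     start_index: int | None = None
--
--     for index, target_date in enumerate(target_dates):
--         if target_date in existing_dates:
--             if start_index is not None:
--                 segments.append((start_index, index - 1))
--                 start_index = None
--             continue
--         if start_index is None:
--             start_index = index
--
--     if start_index is not None:
--         segments.append((start_index, len(target_dates) - 1))
--     return segments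
-- ===== SOURCE B (Python) =====
-- def _find_missing_segments(target_dates, existing_dates):
--     missing = [i for i, d in enumerate(target_dates) if d not in existing_dates]
--     segments = []
--     cur = None  # open run (start, end)
--     for i in missing:
--         if cur is not None and i == cur[1] + 1:
--             cur = (cur[0], i)
--         else:
--             if cur is not None:
--                 segments.append(cur)
--             cur = (i, i)
--     if cur is not None:
--         segments.append(cur)
--     return segments
-- ===== Notes on version B (the rewrite author's own statement) =====
-- stated objective: alternative
-- what changed: Replaced A's inline start_index sentinel state machine with two explicit passes: collect the missing indices, then collapse consecutive index runs into (start, end) segments.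
import Mathlib
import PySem

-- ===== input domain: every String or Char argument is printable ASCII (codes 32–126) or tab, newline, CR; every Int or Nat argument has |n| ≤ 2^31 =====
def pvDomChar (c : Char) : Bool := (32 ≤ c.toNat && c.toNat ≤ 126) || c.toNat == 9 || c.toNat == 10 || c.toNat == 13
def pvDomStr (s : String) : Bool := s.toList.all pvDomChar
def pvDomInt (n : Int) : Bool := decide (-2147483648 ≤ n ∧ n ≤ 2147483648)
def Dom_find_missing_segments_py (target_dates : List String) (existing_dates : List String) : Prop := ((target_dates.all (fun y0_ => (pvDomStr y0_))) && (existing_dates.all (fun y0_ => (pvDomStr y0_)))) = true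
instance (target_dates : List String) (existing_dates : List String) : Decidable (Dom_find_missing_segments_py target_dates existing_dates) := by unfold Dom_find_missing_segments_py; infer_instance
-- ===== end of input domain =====

-- B replaces A's inline start_index sentinel state machine with two passes: collect the
-- missing indices, then collapse consecutive runs into (start, end) segments (objective: alternative decomposition).

-- ===== PORT A =====
-- body of A's for-loop (state: segments so far, optional open start index)
def pvStepA (existing_dates : List String) (acc : List (Int × Int) × Option Int)
    (p : Int × String) : List (Int × Int) × Option Int :=
  if existing_dates.contains p.2 then
    match acc.2 with
    | some s => (acc.1 ++ [(s, p.1 - 1)], none)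
    | none => acc
  else
    match acc.2 with
    | none => (acc.1, some p.1)
    | some _ => acc

def find_missing_segments_py (target_dates : List String) (existing_dates : List String) : List (Int × Int) :=
  let r := (PySem.List.enumerate target_dates 0).foldl (pvStepA existing_dates) ([], none)
  match r.2 with
  | some s => r.1 ++ [(s, (target_dates.length : Int) - 1)]
  | none => r.1

-- ===== PORT B =====
-- body of B's run-grouping loop (state: closed segments, optional open run (start, end))
def pvStepB (acc : List (Int × Int) × Option (Int × Int)) (i : Int) :
    List (Int × Int) × Option (Int × Int) :=
  match acc.2 with
  | some c => if i = c.2 + 1 then (acc.1, some (c.1, i)) else (acc.1 ++ [c], some (i, i))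
  | none => (acc.1, some (i, i))

def find_missing_segments_py_alt (target_dates : List String) (existing_dates : List String) : List (Int × Int) :=
  let missing := (PySem.List.enumerate target_dates 0).filterMap
    (fun p => if existing_dates.contains p.2 then none else some p.1)
  let r := missing.foldl pvStepB ([], none)
  match r.2 with
  | some c => r.1 ++ [c]
  | none => r.1

-- ===== PRECONDITION & SPEC =====
def Spec_find_missing_segments_py (target_dates : List String) (existing_dates : List String) (out : List (Int × Int)) : Prop := out = find_missing_segments_py_alt target_dates existing_dates
instance (target_dates : List String) (existing_dates : List String) (out : List (Int × Int)) : Decidable (Spec_find_missing_segments_py target_dates existing_dates out) := by unfold Spec_find_missing_segments_py; infer_instance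

-- ===== CLAIM (what is proved, stated in full; the proofs are below) =====
def Claim_equal_find_missing_segments_py : Prop := ∀ (target_dates : List String) (existing_dates : List String), Dom_find_missing_segments_py target_dates existing_dates → Spec_find_missing_segments_py target_dates existing_dates (find_missing_segments_py target_dates existing_dates)

-- ===== LEMMAS AND PROOFS =====

-- finishing steps of the two programs
def pvFinA (r : List (Int × Int) × Option Int) (n : Int) : List (Int × Int) :=
  match r.2 with
  | some s => r.1 ++ [(s, n - 1)]
  | none => r.1

def pvFinB (r : List (Int × Int) × Option (Int × Int)) : List (Int × Int) :=
  match r.2 with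
  | some c => r.1 ++ [c]
  | none => r.1

def pvMissing (ex : List String) (ds : List String) (i : Int) : List Int :=
  (PySem.List.enumerate ds i).filterMap (fun p => if ex.contains p.2 then none else some p.1)

lemma pvMissing_ge (ex : List String) (ds : List String) (i : Int) :
    ∀ j ∈ pvMissing ex ds i, i ≤ j := by
  intro j hj
  simp only [pvMissing, List.mem_filterMap] at hj
  obtain ⟨p, hp, hpj⟩ := hj
  split at hpj
  · exact absurd hpj (by simp)
  · obtain ⟨k, hk, rfl⟩ := (PySem.List.mem_enumerate_iff ds i p).1 hp
    simp at hpj; omega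

-- closing an open run (s, e) now or carrying it into a list of indices all > e + 1 is the same
lemma pvCloseB (M : List Int) (segs : List (Int × Int)) (s e : Int)
    (h : ∀ j ∈ M, e + 1 < j) :
    pvFinB (M.foldl pvStepB (segs, some (s, e))) = pvFinB (M.foldl pvStepB (segs ++ [(s, e)], none)) := by
  cases M with
  | nil => simp [pvFinB]
  | cons j M' =>
    have hj : e + 1 < j := h j (by simp)
    simp only [List.foldl_cons, pvStepB]
    rw [if_neg (by omega)]

-- main invariant: running A's loop from offset i with open state st equals running B's
-- grouping over the missing indices from offset i with open run (st, i - 1)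
set_option maxRecDepth 4000 in
lemma pvMain (ex : List String) (ds : List String) :
    ∀ (i : Int) (segs : List (Int × Int)) (st : Option Int),
      pvFinA ((PySem.List.enumerate ds i).foldl (pvStepA ex) (segs, st)) (i + ds.length)
        = pvFinB ((pvMissing ex ds i).foldl pvStepB (segs, st.map (fun s => (s, i - 1)))) := by
  induction ds with
  | nil =>
    intro i segs st
    cases st <;> simp [PySem.List.enumerate_nil, pvMissing, pvFinA, pvFinB]
  | cons d ds ih =>
    intro i segs st
    rw [PySem.List.enumerate_cons]
    have hlen : i + 1 + (ds.length : Int) = i + ((d :: ds).length : Int) := by simp; ring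
    by_cases hd : ex.contains d
    · have hmiss : pvMissing ex (d :: ds) i = pvMissing ex ds (i + 1) := by
        simp only [pvMissing, PySem.List.enumerate_cons, List.filterMap_cons]
        rw [if_pos hd]
      cases st with
      | none =>
        simp only [List.foldl_cons, pvStepA]
        rw [if_pos hd, hmiss]
        have := ih (i + 1) segs none
        rw [hlen] at this
        simpa using this
      | some s =>
        simp only [List.foldl_cons, pvStepA]
        rw [if_pos hd, hmiss]
        have := ih (i + 1) (segs ++ [(s, (i, d).1 - 1)]) none
        rw [hlen] at this
        simp only [Option.map_none] at this
        rw [this]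
        simp only [Option.map_some]
        exact (pvCloseB (pvMissing ex ds (i + 1)) segs s (i - 1)
          (fun j hj => by have := pvMissing_ge ex ds (i + 1) j hj; omega)).symm
    · have hmiss : pvMissing ex (d :: ds) i = i :: pvMissing ex ds (i + 1) := by
        simp only [pvMissing, PySem.List.enumerate_cons, List.filterMap_cons]
        rw [if_neg hd]
      cases st with
      | none =>
        simp only [List.foldl_cons, pvStepA]
        rw [if_neg hd, hmiss]
        have := ih (i + 1) segs (some (i, d).1)
        rw [hlen] at this
        simp only [Option.map_some] at this
        rw [show i + 1 - 1 = i by ring] at this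
        rw [this]
        rfl
      | some s =>
        simp only [List.foldl_cons, pvStepA]
        rw [if_neg hd, hmiss]
        have := ih (i + 1) segs (some s)
        rw [hlen] at this
        simp only [Option.map_some] at this
        rw [show i + 1 - 1 = i by ring] at this
        rw [this]
        have hstep : pvStepB (segs, some (s, i - 1)) i = (segs, some (s, i)) := by
          show (if i = i - 1 + 1 then (segs, some (s, i)) else (segs ++ [(s, i - 1)], some (i, i))) = _
          rw [if_pos (by ring)]
        rw [show (Option.map (fun s => (s, i - 1)) (some s)) = some (s, i - 1) from rfl,
          List.foldl_cons, hstep]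

-- ===== VERDICT (by name: the statement is the Claim_ definition above) =====
theorem find_missing_segments_py_spec : Claim_equal_find_missing_segments_py := by
  intro target_dates existing_dates _
  show find_missing_segments_py target_dates existing_dates = find_missing_segments_py_alt target_dates existing_dates
  have h := pvMain existing_dates target_dates 0 [] none
  simp only [Option.map_none, zero_add] at h
  unfold find_missing_segments_py find_missing_segments_py_alt
  rw [show (fun p : Int × String => if existing_dates.contains p.2 then none else some p.1) =
      (fun p : Int × String => if existing_dates.contains p.2 then (none : Option Int) else some p.1) from rfl]
  exact h
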